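-- pv_equiv track=rewrite | github.com/tony-19-dm/7_semester | stp/lab12/algorithms.py | cyclic_shift_left
-- ===== SOURCE A (Python) =====
-- from typing import List, Tuple, Optional, Any
--
-- def cyclic_shift_left(arr: List[int], k: int) -> List[int]:
--     """
--     6. Осуществлять циклический сдвиг элементов
--     одномерного массива на заданное число позиций влево.
--
--     Args:
--         arr: исходный массив
--         k: количество позиций для сдвига
--
--     Returns:
--         Массив после сдвига
--     """
--     if not arr:
--         return []
--
--     n = len(arr)
--     k = k % n  # Обработка случая, когда k >= n
--
--     if k == 0:
--         return arr.copy()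
--
--     result = [0] * n
--
--     for i in range(n):
--         new_pos = (i - k) % n
--         result[new_pos] = arr[i]
--
--     return result
-- ===== SOURCE B (Python) =====
-- def cyclic_shift_left(arr, k):
--     """Cyclic left shift by k positions: two contiguous slices instead of per-element index math."""
--     if not arr:
--         return []
--     k = k % len(arr)
--     return arr[k:] + arr[:k]
-- ===== Notes on version B (the rewrite author's own statement) =====
-- stated objective: simpler
-- what changed: Replaced the per-element scatter loop computing (i-k)%n destinations into a preallocated zero array with a single two-slice concatenation arr[k:] + arr[:k] after reducing k mod n.
import Mathlib
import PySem

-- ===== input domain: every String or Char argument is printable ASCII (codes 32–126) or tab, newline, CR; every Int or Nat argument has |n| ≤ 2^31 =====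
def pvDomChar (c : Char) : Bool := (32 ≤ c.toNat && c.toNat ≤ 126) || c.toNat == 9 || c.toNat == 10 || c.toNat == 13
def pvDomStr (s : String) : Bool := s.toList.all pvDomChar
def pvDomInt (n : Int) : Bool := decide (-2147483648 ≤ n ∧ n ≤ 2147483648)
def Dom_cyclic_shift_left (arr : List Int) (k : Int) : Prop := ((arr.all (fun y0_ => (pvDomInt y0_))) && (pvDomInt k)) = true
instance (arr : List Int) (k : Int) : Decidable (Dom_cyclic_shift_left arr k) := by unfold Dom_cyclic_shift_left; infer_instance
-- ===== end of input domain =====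

-- B changes: the per-element scatter loop of A is replaced by a two-slice concatenation (simpler).

-- ===== PORT A =====
-- literal transliteration of A: empty guard, k %= n, copy if k = 0,
-- otherwise scatter arr[i] into result[(i-k) % n] over a zero-filled array.
def cyclic_shift_left (arr : List Int) (k : Int) : List Int :=
  if arr = [] then []
  else
    let n : Int := arr.length
    let k2 := PySem.Int.mod k n
    if k2 = 0 then arr
    else
      (PySem.List.pyRange 0 n 1).foldl
        (fun result i =>
          let newPos := PySem.Int.mod (i - k2) n
          PySem.List.pySetD result newPos (PySem.List.pyGetD arr i 0))
        (List.replicate arr.length 0)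

-- ===== PORT B =====
-- transliteration of Source B: arr[k:] + arr[:k] after k %= len(arr)
def cyclic_shift_left_alt (arr : List Int) (k : Int) : List Int :=
  if arr = [] then []
  else
    let k2 := PySem.Int.mod k (arr.length : Int)
    PySem.List.slice arr (some k2) none ++ PySem.List.slice arr none (some k2)

-- ===== PRECONDITION & SPEC =====
def Spec_cyclic_shift_left (arr : List Int) (k : Int) (out : List Int) : Prop := out = cyclic_shift_left_alt arr k
instance (arr : List Int) (k : Int) (out : List Int) : Decidable (Spec_cyclic_shift_left arr k out) := by unfold Spec_cyclic_shift_left; infer_instance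

-- ===== CLAIM (what is proved, stated in full; the proofs are below) =====
def Claim_equal_cyclic_shift_left : Prop := ∀ (arr : List Int) (k : Int), Dom_cyclic_shift_left arr k → Spec_cyclic_shift_left arr k (cyclic_shift_left arr k)

-- ===== LEMMAS AND PROOFS =====

-- the scatter loop preserves length
theorem pv_length_foldl_set (s : List Nat) :
    ∀ (init : List Int) (f : Nat → Nat) (g : Nat → Int),
      (s.foldl (fun r i => r.set (f i) (g i)) init).length = init.length := by
  induction s with
  | nil => intro init f g; simp
  | cons i rest ih => intro init f g; simp [List.foldl_cons, ih]

-- pointwise description of the scatter loop (Nat form)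
theorem pv_scatter_getElem? (arr : List Int) (m : Nat) (hm : m < arr.length) :
    ∀ (s : List Nat), (∀ i ∈ s, i < arr.length) →
      ∀ (init : List Int), init.length = arr.length →
        ∀ j, j < arr.length →
          (s.foldl (fun r i =>
              r.set ((i + (arr.length - m)) % arr.length) (arr.getD i 0)) init)[j]? =
            if (j + m) % arr.length ∈ s then arr[(j + m) % arr.length]? else init[j]? := by
  intro s
  induction s with
  | nil => intro _ init _ j _; simp
  | cons i rest ih =>
    intro hlt init hlen j hj
    have hi : i < arr.length := hlt i (List.mem_cons_self ..)
    have hrest : ∀ x ∈ rest, x < arr.length := fun x hx => hlt x (List.mem_cons_of_mem _ hx)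
    have hd : (i + (arr.length - m)) % arr.length < arr.length :=
      Nat.mod_lt _ (by omega)
    simp only [List.foldl_cons]
    rw [ih hrest (init.set ((i + (arr.length - m)) % arr.length) (arr.getD i 0))
        (by simp [hlen]) j hj]
    by_cases hmem : (j + m) % arr.length ∈ rest
    · simp [hmem]
    · have hdj : (i + (arr.length - m)) % arr.length = j ↔ (j + m) % arr.length = i := by
        constructor
        · intro h
          have : ((i + (arr.length - m)) % arr.length + m) % arr.length
              = (i + (arr.length - m) + m) % arr.length := Nat.mod_add_mod _ _ _
          have h2 : (j + m) % arr.length = (i + (arr.length - m) + m) % arr.length := by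
            rw [← h, this]
          have h3 : i + (arr.length - m) + m = i + arr.length := by omega
          rw [h3, Nat.add_mod_right, Nat.mod_eq_of_lt hi] at h2
          exact h2
        · intro h
          have h3 : j + m + (arr.length - m) = j + arr.length := by omega
          calc (i + (arr.length - m)) % arr.length
              = ((j + m) % arr.length + (arr.length - m)) % arr.length := by rw [h]
            _ = (j + m + (arr.length - m)) % arr.length := Nat.mod_add_mod _ _ _
            _ = j := by rw [h3, Nat.add_mod_right, Nat.mod_eq_of_lt hj]
      by_cases heq : (j + m) % arr.length = i
      · have hdj' : (i + (arr.length - m)) % arr.length = j := hdj.mpr heq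
        rw [if_neg hmem, if_pos (List.mem_cons.mpr (Or.inl heq)),
          hdj', List.getElem?_set_self (by omega), heq,
          List.getD_eq_getElem arr 0 hi, List.getElem?_eq_getElem hi]
      · have hne : (i + (arr.length - m)) % arr.length ≠ j := fun h => heq (hdj.mp h)
        have : ((j + m) % arr.length ∈ i :: rest) = False := by
          simp [hmem, heq]
        simp only [this, if_false, hmem, if_false]
        rw [List.getElem?_set_ne hne]

-- Python's (↑i - ↑m) % ↑n in Nat terms, for i < n, m < n
theorem pv_int_mod_sub (n m i : Nat) (hm : m < n) :
    PySem.Int.mod ((i : Int) - (m : Int)) (n : Int)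
      = (((i + (n - m)) % n : Nat) : Int) := by
  rw [PySem.Int.mod_eq_emod_of_pos (by exact_mod_cast Nat.lt_of_le_of_lt (Nat.zero_le m) hm)]
  have h1 : (i : Int) - (m : Int) = ((i + (n - m) : Nat) : Int) - (n : Int) := by
    push_cast [Nat.cast_sub (le_of_lt hm)]; ring
  rw [h1, Int.sub_emod_right]
  exact_mod_cast (Int.natCast_mod (i + (n - m)) n).symm

-- ===== VERDICT (by name: the statement is the Claim_ definition above) =====
theorem cyclic_shift_left_spec : Claim_equal_cyclic_shift_left := by
  intro arr k _
  unfold Spec_cyclic_shift_left cyclic_shift_left cyclic_shift_left_alt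
  by_cases hnil : arr = []
  · simp [hnil]
  · simp only [hnil, if_false]
    have hn : 0 < arr.length := List.length_pos_of_ne_nil hnil
    have hnpos : (0 : Int) < (arr.length : Int) := by exact_mod_cast hn
    set k2 := PySem.Int.mod k (arr.length : Int) with hk2
    have hk2e : k2 = k % (arr.length : Int) := PySem.Int.mod_eq_emod_of_pos hnpos
    have hk2nn : 0 ≤ k2 := hk2e ▸ Int.emod_nonneg k (by omega)
    have hk2lt : k2 < (arr.length : Int) := hk2e ▸ Int.emod_lt_of_pos k hnpos
    set m := k2.toNat with hmdef
    have hmc : (m : Int) = k2 := Int.toNat_of_nonneg hk2nn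
    have hmlt : m < arr.length := by omega
    -- B side: two slices = drop m ++ take m
    have hB : PySem.List.slice arr (some k2) none ++ PySem.List.slice arr none (some k2)
        = arr.drop m ++ arr.take m := by
      rw [PySem.List.slice_from arr hk2nn, PySem.List.slice_to arr hk2nn]
    rw [hB]
    by_cases hk0 : k2 = 0
    · have hm0 : m = 0 := by omega
      simp [hk0, hm0]
    · simp only [hk0, if_false]
      -- A side: rewrite the Int fold as the Nat scatter fold
      have hrange : PySem.List.pyRange 0 (arr.length : Int) 1
          = (List.range arr.length).map (fun i : Nat => (i : Int)) := by
        rw [PySem.List.pyRange_one]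
        simp
      rw [hrange, List.foldl_map]
      have hstep : ∀ (r : List Int) (i : Nat), i ∈ List.range arr.length →
          (fun (result : List Int) (i : Int) =>
            PySem.List.pySetD result (PySem.Int.mod (i - k2) (arr.length : Int))
              (PySem.List.pyGetD arr i 0)) r (i : Int)
          = r.set ((i + (arr.length - m)) % arr.length) (arr.getD i 0) := by
        intro r i hi
        have hi' : i < arr.length := List.mem_range.mp hi
        simp only []
        rw [← hmc, pv_int_mod_sub arr.length m i hmlt]
        rw [PySem.List.pySetD_natCast, PySem.List.pyGetD_natCast]
      rw [PySem.List.foldl_congr_mem _ _ _ _ hstep]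
      -- now compare pointwise
      have hlenA : (List.foldl (fun r i =>
            r.set ((i + (arr.length - m)) % arr.length) (arr.getD i 0))
            (List.replicate arr.length 0) (List.range arr.length)).length
          = arr.length := by
        rw [pv_length_foldl_set]; simp
      have hlenB : (arr.drop m ++ arr.take m).length = arr.length := by
        simp; omega
      apply List.ext_getElem?
      intro j
      by_cases hj : j < arr.length
      · rw [pv_scatter_getElem? arr m hmlt (List.range arr.length)
            (fun x hx => List.mem_range.mp hx) (List.replicate arr.length 0)
            (by simp) j hj]
        have hjm : (j + m) % arr.length < arr.length := Nat.mod_lt _ hn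
        rw [if_pos (List.mem_range.mpr hjm)]
        -- RHS via rotate
        have hrot : arr.drop m ++ arr.take m = arr.rotate m :=
          (List.rotate_eq_drop_append_take (le_of_lt hmlt)).symm
        rw [hrot]
        have hjr : j < (arr.rotate m).length := by simp [hj]
        rw [List.getElem?_eq_getElem hjm, List.getElem?_eq_getElem hjr,
          List.getElem_rotate]
      · rw [List.getElem?_eq_none (by omega), List.getElem?_eq_none (by omega)]
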